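-- pv_equiv track=rewrite | github.com/AdLucem/feverous-code | src/evaluators/evaluate_sections_recall.py | get_last_section
-- ===== SOURCE A (Python) =====
-- def get_last_section(context_ls):
--     """Get the last element of the context list that is a section"""
--
--     sections = [el for el in context_ls if "section_" in el]
--
--     if sections == []:
--         # unless last element is also title, in which case it's "introduction"
--         last_section_id = "introduction"
--     else:
--         last_section = sections[-1]
--         # section IDs in context list are of form, for eg:
--         # "Algebraic logic_section_4". We want just the section ID
--         last_section_id = "_".join(last_section.split("_")[1:])
--
--     return last_section_id
-- ===== SOURCE B (Python) =====
-- def get_last_section(context_ls):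
--     """Get the last element of the context list that is a section"""
--     for el in reversed(context_ls):
--         if "section_" in el:
--             return "_".join(el.split("_")[1:])
--     return "introduction"
-- ===== Notes on version B (the rewrite author's own statement) =====
-- stated objective: simpler
-- what changed: Replaces the forward filter-then-index-[-1] pass by a single backward scan with early exit that returns on the first (i.e. last) section element, maintaining no intermediate list.
import Mathlib
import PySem

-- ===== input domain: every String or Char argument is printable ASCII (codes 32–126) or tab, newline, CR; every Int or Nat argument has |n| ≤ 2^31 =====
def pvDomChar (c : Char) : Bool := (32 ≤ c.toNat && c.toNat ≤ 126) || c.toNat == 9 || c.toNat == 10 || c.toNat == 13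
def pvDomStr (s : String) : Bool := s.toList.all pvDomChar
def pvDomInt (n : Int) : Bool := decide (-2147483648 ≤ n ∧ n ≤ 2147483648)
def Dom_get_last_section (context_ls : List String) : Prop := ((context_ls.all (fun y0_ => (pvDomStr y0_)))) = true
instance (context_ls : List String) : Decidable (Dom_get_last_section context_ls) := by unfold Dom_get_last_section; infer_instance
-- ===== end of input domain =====

-- B replaces A's filter-then-[-1] pass by a backward scan with early exit (simpler; return value only).

-- ===== PORT A =====
def get_last_section (context_ls : List String) : String :=
  let sections := context_ls.filter (fun el => PySem.Str.isIn "section_" el)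
  if sections = [] then
    "introduction"
  else
    -- sections[-1]: in-range because sections ≠ []; .getD "" is never taken
    let last_section := (PySem.List.pyGet? sections (-1)).getD ""
    PySem.Str.join "_" (((PySem.Str.split? last_section "_").getD []).drop 1)

-- ===== PORT B =====
-- the reversed-for loop with early return, as structural recursion over the reversed list
def altLoop : List String → String
  | [] => "introduction"
  | el :: rest =>
      if PySem.Str.isIn "section_" el then
        PySem.Str.join "_" (((PySem.Str.split? el "_").getD []).drop 1)
      else
        altLoop rest

def get_last_section_alt (context_ls : List String) : String :=
  altLoop context_ls.reverse

-- ===== PRECONDITION & SPEC =====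
def Spec_get_last_section (context_ls : List String) (out : String) : Prop := out = get_last_section_alt context_ls
instance (context_ls : List String) (out : String) : Decidable (Spec_get_last_section context_ls out) := by unfold Spec_get_last_section; infer_instance

-- ===== CLAIM (what is proved, stated in full; the proofs are below) =====
def Claim_equal_get_last_section : Prop := ∀ (context_ls : List String), Dom_get_last_section context_ls → Spec_get_last_section context_ls (get_last_section context_ls)

-- ===== LEMMAS AND PROOFS =====

-- altLoop returns "introduction" iff no element matches, else the id of the first match
theorem altLoop_eq_filter (r : List String) :
    altLoop r =
      match r.filter (fun el => PySem.Str.isIn "section_" el) with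
      | [] => "introduction"
      | x :: _ => PySem.Str.join "_" (((PySem.Str.split? x "_").getD []).drop 1) := by
  induction r with
  | nil => rfl
  | cons el rest ih =>
      by_cases h : PySem.Str.isIn "section_" el = true
      · simp only [altLoop, List.filter_cons, h, if_pos]
      · simp only [altLoop, List.filter_cons, h, Bool.false_eq_true, ite_false, ih]

-- ===== VERDICT (by name: the statement is the Claim_ definition above) =====
theorem get_last_section_spec : Claim_equal_get_last_section := by
  intro ls _
  unfold Spec_get_last_section get_last_section_alt
  rw [altLoop_eq_filter, List.filter_reverse]
  simp only [get_last_section]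
  cases hf : (ls.filter (fun el => PySem.Str.isIn "section_" el)).reverse with
  | nil =>
      have h0 : ls.filter (fun el => PySem.Str.isIn "section_" el) = [] := by
        simpa using congrArg List.reverse hf
      rw [if_pos h0]
  | cons x xs =>
      have hne : ls.filter (fun el => PySem.Str.isIn "section_" el) ≠ [] := by
        intro h; rw [h] at hf; simp at hf
      have hlast : (ls.filter (fun el => PySem.Str.isIn "section_" el)).getLast? = some x := by
        rw [List.getLast?_eq_head?_reverse, hf]; rfl
      rw [if_neg hne, PySem.List.pyGet?_neg_one, hlast]
      rfl
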